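-- pv_equiv track=rewrite | github.com/5garashi/sip_server | mini_sip_proxy_auth.py | rewrite_sdp_media_port
-- ===== SOURCE A (Python) =====
-- def rewrite_sdp_media_port(msg: str, new_port: int) -> str:
--     """
--     SDP m= row（m=audio, m=video, m=application etc）rewrite port number.
--
--     Parameters:
--         msg (str): SIP message
--         new_port (int): port for rtp relay
--
--     Returns:
--         str: message strings after rewrite
--     """
--     lines = msg.splitlines()
--     new_lines = []
--     in_sdp = False
--
--     for line in lines:
--         if in_sdp and line.startswith("m="):
--             parts = line.strip().split()
--             if len(parts) >= 2 and parts[1].isdigit():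
--                 parts[1] = str(new_port)  # rewrite only port number.
--                 line = " ".join(parts)
--
--         new_lines.append(line)
--
--         # SDP section starts after empty row.
--         if line.strip() == "":
--             in_sdp = True
--
--     return "\r\n".join(new_lines) + "\r\n"
-- ===== SOURCE B (Python) =====
-- def _rewrite_m_line(line, new_port):
--     if not line.startswith("m="):
--         return line
--     parts = line.strip().split()
--     if len(parts) >= 2 and parts[1].isdigit():
--         parts[1] = str(new_port)
--         return " ".join(parts)
--     return line
--
--
-- def rewrite_sdp_media_port(msg: str, new_port: int) -> str:
--     lines = msg.splitlines()
--     boundary = next((i for i, l in enumerate(lines) if l.strip() == ""), None)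
--     if boundary is None:
--         return "\r\n".join(lines) + "\r\n"
--     head = lines[:boundary + 1]
--     body = [_rewrite_m_line(l, new_port) for l in lines[boundary + 1:]]
--     return "\r\n".join(head + body) + "\r\n"
-- ===== Notes on version B (the rewrite author's own statement) =====
-- stated objective: alternative
-- what changed: Replaces A's single stateful pass with an in_sdp flag by an explicit partition: find the first whitespace-only line, keep the header slice verbatim, and map the m=-line port rewrite over the body slice only.
import Mathlib
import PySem

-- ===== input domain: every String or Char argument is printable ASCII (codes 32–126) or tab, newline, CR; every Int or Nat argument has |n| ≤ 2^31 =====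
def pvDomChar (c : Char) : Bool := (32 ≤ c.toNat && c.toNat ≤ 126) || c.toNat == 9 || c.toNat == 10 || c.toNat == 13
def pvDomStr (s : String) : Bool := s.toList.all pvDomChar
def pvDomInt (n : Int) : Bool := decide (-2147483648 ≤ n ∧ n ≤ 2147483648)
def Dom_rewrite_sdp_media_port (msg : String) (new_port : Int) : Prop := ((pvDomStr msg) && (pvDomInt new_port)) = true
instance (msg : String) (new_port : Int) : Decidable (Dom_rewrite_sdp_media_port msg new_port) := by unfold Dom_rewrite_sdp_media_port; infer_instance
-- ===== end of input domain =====

-- B replaces A's stateful in_sdp flag pass by an explicit partition at the first whitespace-only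
-- line (header kept verbatim, the m=-port rewrite mapped over the body); same cost, different decomposition.

-- ===== PORT A =====
-- loop body of A's single pass: state = (new_lines, in_sdp)
def pvStepA (new_port : Int) (st : List String × Bool) (line : String) : List String × Bool :=
  let line :=
    if st.2 && PySem.Str.startswith line "m=" then
      let parts := PySem.Str.split₀ (PySem.Str.strip line)
      if decide (2 ≤ parts.length) && PySem.Str.strIsdigit (parts.getD 1 "") then
        PySem.Str.join " " (parts.set 1 (PySem.Int.toStr new_port))
      else line
    else line
  (st.1 ++ [line], st.2 || (PySem.Str.strip line == ""))

def rewrite_sdp_media_port (msg : String) (new_port : Int) : String :=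
  let lines := PySem.Str.splitlines msg
  let res := lines.foldl (pvStepA new_port) ([], false)
  PySem.Str.join "\r\n" res.1 ++ "\r\n"

-- ===== PORT B =====
-- B's helper _rewrite_m_line
def pvRewLineB (new_port : Int) (line : String) : String :=
  if PySem.Str.startswith line "m=" then
    let parts := PySem.Str.split₀ (PySem.Str.strip line)
    if decide (2 ≤ parts.length) && PySem.Str.strIsdigit (parts.getD 1 "") then
      PySem.Str.join " " (parts.set 1 (PySem.Int.toStr new_port))
    else line
  else line

def rewrite_sdp_media_port_alt (msg : String) (new_port : Int) : String :=
  let lines := PySem.Str.splitlines msg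
  match lines.findIdx? (fun l => PySem.Str.strip l == "") with
  | none => PySem.Str.join "\r\n" lines ++ "\r\n"
  | some i =>
      PySem.Str.join "\r\n"
        (lines.take (i + 1) ++ (lines.drop (i + 1)).map (pvRewLineB new_port)) ++ "\r\n"

-- ===== PRECONDITION & SPEC =====
def Spec_rewrite_sdp_media_port (msg : String) (new_port : Int) (out : String) : Prop := out = rewrite_sdp_media_port_alt msg new_port
instance (msg : String) (new_port : Int) (out : String) : Decidable (Spec_rewrite_sdp_media_port msg new_port out) := by unfold Spec_rewrite_sdp_media_port; infer_instance

-- ===== CLAIM (what is proved, stated in full; the proofs are below) =====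
def Claim_equal_rewrite_sdp_media_port : Prop := ∀ (msg : String) (new_port : Int), Dom_rewrite_sdp_media_port msg new_port → Spec_rewrite_sdp_media_port msg new_port (rewrite_sdp_media_port msg new_port)

-- ===== LEMMAS AND PROOFS =====

-- Once in_sdp is true, A's step appends exactly B's rewritten line and keeps the flag true.
theorem pvStepA_true (new_port : Int) (acc : List String) (line : String) :
    pvStepA new_port (acc, true) line = (acc ++ [pvRewLineB new_port line], true) := by
  simp [pvStepA, pvRewLineB]

-- A's loop after the boundary is exactly B's map.
theorem pvFoldA_true (new_port : Int) :
    ∀ (ls : List String) (acc : List String),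
      ls.foldl (pvStepA new_port) (acc, true) = (acc ++ ls.map (pvRewLineB new_port), true) := by
  intro ls
  induction ls with
  | nil => intro acc; simp
  | cons l ls ih =>
      intro acc
      simp only [List.foldl_cons, pvStepA_true, List.map_cons]
      rw [ih]
      simp

-- A's loop from a false flag computes B's partition-then-map result.
theorem pvFoldA_false (new_port : Int) :
    ∀ (ls : List String) (acc : List String),
      (ls.foldl (pvStepA new_port) (acc, false)).1 =
        acc ++ (match ls.findIdx? (fun l => PySem.Str.strip l == "") with
          | none => ls
          | some i => ls.take (i + 1) ++ (ls.drop (i + 1)).map (pvRewLineB new_port)) := by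
  intro ls
  induction ls with
  | nil => intro acc; simp
  | cons l ls ih =>
      intro acc
      have hstep : pvStepA new_port (acc, false) l =
          (acc ++ [l], (PySem.Str.strip l == "")) := by
        simp [pvStepA]
      by_cases h : PySem.Str.strip l == ""
      · simp only [List.foldl_cons, hstep, h]
        rw [pvFoldA_true]
        simp [List.findIdx?_cons, h]
      · simp only [List.foldl_cons, hstep, Bool.not_eq_true] at *
        rw [h]
        rw [ih (acc ++ [l])]
        simp only [List.findIdx?_cons, h]
        cases hf : ls.findIdx? (fun l => PySem.Str.strip l == "") with
        | none => simp
        | some i => simp [List.take_succ_cons, List.drop_succ_cons]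

-- ===== VERDICT (by name: the statement is the Claim_ definition above) =====
theorem rewrite_sdp_media_port_spec : Claim_equal_rewrite_sdp_media_port := by
  intro msg new_port _
  unfold Spec_rewrite_sdp_media_port rewrite_sdp_media_port rewrite_sdp_media_port_alt
  dsimp only
  rw [pvFoldA_false new_port (PySem.Str.splitlines msg) []]
  cases hf : (PySem.Str.splitlines msg).findIdx? (fun l => PySem.Str.strip l == "") with
  | none => simp
  | some i => simp
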